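-- pv_equiv track=rewrite | github.com/trents/sudoku_solver | sudoku_solver.py | find_twice_in_row
-- ===== SOURCE A (Python) =====
-- def find_twice_in_row(row):
--     results = []
--     for i in range(9):
--        temp_string = str(i)
--        count = 0
--        for item in row:
--           if temp_string in item:
--               count += 1
--        if count == 2:
--           results.append(temp_string)
--     return results
-- ===== SOURCE B (Python) =====
-- def find_twice_in_row(row):
--     counts = {}
--     for item in row:
--         for ch in set(item):
--             if '0' <= ch <= '8':
--                 counts[ch] = counts.get(ch, 0) + 1
--     return [d for d in "012345678" if counts.get(d) == 2]
-- ===== Notes on version B (the rewrite author's own statement) =====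
-- stated objective: alternative
-- what changed: A scans the whole row once per digit (9 passes, substring test each); B makes a single pass over the row, tallying each item's distinct digit characters in a dict, then reads digits '0'..'8' off the counter.
import Mathlib
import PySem

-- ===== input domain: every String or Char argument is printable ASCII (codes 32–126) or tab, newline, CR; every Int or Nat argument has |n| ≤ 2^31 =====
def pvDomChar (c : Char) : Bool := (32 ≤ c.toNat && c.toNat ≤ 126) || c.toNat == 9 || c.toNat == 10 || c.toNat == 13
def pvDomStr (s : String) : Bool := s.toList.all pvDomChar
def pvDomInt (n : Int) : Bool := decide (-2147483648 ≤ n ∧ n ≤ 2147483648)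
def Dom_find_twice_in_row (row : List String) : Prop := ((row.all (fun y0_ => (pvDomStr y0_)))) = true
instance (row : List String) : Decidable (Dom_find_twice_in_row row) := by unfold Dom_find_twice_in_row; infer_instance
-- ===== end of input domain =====

-- B replaces A's 9×n substring scan with one pass over the row building a digit counter, then reads digits '0'..'8' off it (alternative decomposition).


-- ===== PORT A =====
def find_twice_in_row (row : List String) : List String :=
  (PySem.List.pyRange 0 9 1).foldl (fun results i =>
    let temp_string := PySem.Int.toStr i
    let count : Int := row.foldl (fun count item =>
      if PySem.Str.isIn temp_string item then count + 1 else count) 0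
    if count == 2 then results ++ [temp_string] else results) []

-- ===== PORT B =====
def find_twice_in_row_alt (row : List String) : List String :=
  let counts : PySem.Dict Char Int := row.foldl (fun counts item =>
    (PySem.Set.ofList item.toList).foldl (fun counts ch =>
      if '0' ≤ ch ∧ ch ≤ '8' then counts.modify ch 0 (· + 1) else counts) counts)
    PySem.Dict.empty
  (("012345678".toList).filter (fun d => counts.getD d 0 == 2)).map (fun d => String.ofList [d])

-- ===== PRECONDITION & SPEC =====
def Spec_find_twice_in_row (row : List String) (out : List String) : Prop := out = find_twice_in_row_alt row
instance (row : List String) (out : List String) : Decidable (Spec_find_twice_in_row row out) := by unfold Spec_find_twice_in_row; infer_instance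

-- ===== CLAIM (what is proved, stated in full; the proofs are below) =====
def Claim_equal_find_twice_in_row : Prop := ∀ (row : List String), Dom_find_twice_in_row row → Spec_find_twice_in_row row (find_twice_in_row row)

-- ===== LEMMAS AND PROOFS =====

-- B's counter holds, at any digit c, the number of items whose characters include c.
theorem counts_getD (row : List String) (d : PySem.Dict Char Int) (c : Char)
    (hc : ('0' ≤ c ∧ c ≤ '8')) :
    (row.foldl (fun counts item =>
      (PySem.Set.ofList item.toList).foldl (fun counts ch =>
        if '0' ≤ ch ∧ ch ≤ '8' then counts.modify ch 0 (· + 1) else counts) counts) d).getD c 0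
    = d.getD c 0 + (row.countP (fun item => decide (c ∈ item.toList)) : Int) := by
  induction row generalizing d with
  | nil => simp
  | cons item rest ih =>
    rw [List.foldl_cons, ih, PySem.List.foldl_ite_eq_foldl_filter,
        PySem.Dict.getD_foldl_modify_add_one]
    have hcount : (((PySem.Set.ofList item.toList).filter
        (fun ch => decide ('0' ≤ ch ∧ ch ≤ '8'))).count c : Int)
        = if c ∈ item.toList then 1 else 0 := by
      rw [List.count_filter (by simpa using hc)]
      have hnd : (PySem.Set.ofList item.toList).Nodup := PySem.Set.nodup_ofList _
      by_cases hm : c ∈ item.toList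
      · have : (PySem.Set.ofList item.toList).count c = 1 :=
          List.count_eq_one_of_mem hnd (by simpa [PySem.Set.mem_ofList] using hm)
        rw [if_pos hm, this]
        rfl
      · rw [if_neg hm]
        simp [List.count_eq_zero, PySem.Set.mem_ofList, hm]
    rw [hcount, List.countP_cons]
    by_cases hm : c ∈ item.toList
    · simp [hm]
      ring
    · simp [hm]

-- For a single-character needle, Python's substring test is character membership.
theorem isIn_singleton (c : Char) (s : String) :
    PySem.Str.isIn (String.ofList [c]) s = decide (c ∈ s.toList) := by
  rw [Bool.eq_iff_iff]
  simp [PySem.Chars.isIn_iff_infix, List.singleton_infix_iff]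

-- A's inner loop counts the same items.
theorem acount (row : List String) (c : Char) :
    (row.foldl (fun count item =>
      if PySem.Str.isIn (String.ofList [c]) item then count + 1 else count) (0 : Int))
    = (row.countP (fun item => decide (c ∈ item.toList)) : Int) := by
  simp only [isIn_singleton]
  rw [PySem.List.foldl_ite_add_one]
  simp

-- filter+map over two lists paired elementwise by equal tests and equal images
theorem filter_map_pair (l : List (Int × Char)) (p : Int → Bool) (q : Char → Bool)
    (f : Int → String) (g : Char → String)
    (h : ∀ x ∈ l, p x.1 = q x.2 ∧ f x.1 = g x.2) :
    ((l.map Prod.fst).filter p).map f = ((l.map Prod.snd).filter q).map g := by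
  induction l with
  | nil => rfl
  | cons a t ih =>
    have ha := h a (List.mem_cons_self)
    have ht := ih (fun x hx => h x (List.mem_cons_of_mem a hx))
    simp only [List.map_cons, List.filter_cons, ha.1]
    rcases hq : q a.2 with _|_ <;> simp [ht, ha.2]

theorem find_twice_in_row_spec : Claim_equal_find_twice_in_row := by
  intro row _
  unfold Spec_find_twice_in_row find_twice_in_row find_twice_in_row_alt
  rw [PySem.List.foldl_append_if
        (p := fun i => (row.foldl (fun count item =>
          if PySem.Str.isIn (PySem.Int.toStr i) item then count + 1 else count) (0:Int)) == 2)
        (f := fun i => PySem.Int.toStr i)]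
  rw [List.nil_append]
  have hfst : PySem.List.pyRange 0 9 1
      = ([(0,'0'),(1,'1'),(2,'2'),(3,'3'),(4,'4'),(5,'5'),(6,'6'),(7,'7'),(8,'8')] : List (Int × Char)).map Prod.fst := rfl
  have hsnd : ("012345678".toList)
      = ([(0,'0'),(1,'1'),(2,'2'),(3,'3'),(4,'4'),(5,'5'),(6,'6'),(7,'7'),(8,'8')] : List (Int × Char)).map Prod.snd := rfl
  rw [hfst, hsnd]
  apply filter_map_pair
  intro x hx
  have key : ∀ (i : Int) (c : Char), PySem.Int.toStr i = String.ofList [c] → ('0' ≤ c ∧ c ≤ '8') →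
      ((row.foldl (fun count item =>
          if PySem.Str.isIn (PySem.Int.toStr i) item then count + 1 else count) (0:Int)) == 2)
      = ((row.foldl (fun counts item =>
          (PySem.Set.ofList item.toList).foldl (fun counts ch =>
            if '0' ≤ ch ∧ ch ≤ '8' then counts.modify ch 0 (· + 1) else counts) counts)
          (PySem.Dict.empty : PySem.Dict Char Int)).getD c 0 == 2) := by
    intro i c hi hc
    rw [hi, acount, counts_getD row PySem.Dict.empty c hc, PySem.Dict.getD_empty, zero_add]
  fin_cases hx
  · exact ⟨key 0 '0' rfl (by decide), rfl⟩
  · exact ⟨key 1 '1' rfl (by decide), rfl⟩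
  · exact ⟨key 2 '2' rfl (by decide), rfl⟩
  · exact ⟨key 3 '3' rfl (by decide), rfl⟩
  · exact ⟨key 4 '4' rfl (by decide), rfl⟩
  · exact ⟨key 5 '5' rfl (by decide), rfl⟩
  · exact ⟨key 6 '6' rfl (by decide), rfl⟩
  · exact ⟨key 7 '7' rfl (by decide), rfl⟩
  · exact ⟨key 8 '8' rfl (by decide), rfl⟩
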